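-- pv_equiv track=rewrite | github.com/Noertri/Repositoriku-v2 | Freecodecamp/assign2.py | time_decision
-- ===== SOURCE A (Python) =====
-- def time_decision(hour, minute, info):
--     if hour < 12:
--         ans1 = "{}:{} {}".format(str(hour), str(minute).zfill(2), info)
--         n = 0
--     elif (hour >= 12) and (hour < 24):
--         if hour > 12:
--             hour = hour % 12
--         if info == 'AM':
--             ans1 = "{}:{} PM".format(str(hour), str(minute).zfill(2))
--             n = 0
--         else:
--             ans1 = "{}:{} AM".format(str(hour), str(minute).zfill(2))
--             n = 1
--     else:
--         days = hour // 24
--         hour = hour % 24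
--         n, ans1 = time_decision(hour, minute, info)
--         n = n + days
--
--     return n, ans1
-- ===== SOURCE B (Python) =====
-- def time_decision(hour, minute, info):
--     # Non-recursive: compute the day carry up front, then one pass of branching.
--     n = 0
--     if hour >= 24:
--         n = hour // 24
--         hour = hour % 24
--     mm = str(minute).zfill(2)
--     if hour < 12:
--         return n, "{}:{} {}".format(str(hour), mm, info)
--     h = hour % 12 if hour > 12 else hour
--     if info == 'AM':
--         return n, "{}:{} PM".format(str(h), mm)
--     return n + 1, "{}:{} AM".format(str(h), mm)
-- ===== Notes on version B (the rewrite author's own statement) =====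
-- stated objective: simpler
-- what changed: Replaces the recursive hour>=24 branch with an up-front days = hour//24 / hour %= 24 reduction and a single flat pass of branching (shared zfill of minutes, early returns), so the function is non-recursive.
import Mathlib
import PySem

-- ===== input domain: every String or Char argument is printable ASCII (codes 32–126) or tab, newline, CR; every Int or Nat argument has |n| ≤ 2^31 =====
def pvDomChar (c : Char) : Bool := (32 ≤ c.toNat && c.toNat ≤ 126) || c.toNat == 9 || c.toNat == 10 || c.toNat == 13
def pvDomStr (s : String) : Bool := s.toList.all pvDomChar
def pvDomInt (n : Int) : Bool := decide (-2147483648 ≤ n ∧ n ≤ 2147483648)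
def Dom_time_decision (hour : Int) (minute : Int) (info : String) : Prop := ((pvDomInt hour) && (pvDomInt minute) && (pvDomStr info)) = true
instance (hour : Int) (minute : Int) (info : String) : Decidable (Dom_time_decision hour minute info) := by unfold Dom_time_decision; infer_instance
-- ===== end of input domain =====

-- B replaces A's recursive hour>=24 branch by an up-front days/hour reduction and one flat pass of branching (simpler, non-recursive).


-- ===== PORT A =====
def time_decision (hour : Int) (minute : Int) (info : String) : Int × String :=
  if hour < 12 then
    (0, PySem.Int.toStr hour ++ ":" ++ PySem.Str.zfill (PySem.Int.toStr minute) 2 ++ " " ++ info)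
  else if 12 ≤ hour ∧ hour < 24 then
    let hour' := if 12 < hour then PySem.Int.mod hour 12 else hour
    if info == "AM" then
      (0, PySem.Int.toStr hour' ++ ":" ++ PySem.Str.zfill (PySem.Int.toStr minute) 2 ++ " PM")
    else
      (1, PySem.Int.toStr hour' ++ ":" ++ PySem.Str.zfill (PySem.Int.toStr minute) 2 ++ " AM")
  else
    let days := PySem.Int.floordiv hour 24
    let hour' := PySem.Int.mod hour 24
    let p := time_decision hour' minute info
    (p.1 + days, p.2)
termination_by hour.toNat
decreasing_by
  have h2 : 0 ≤ hour % 24 := Int.emod_nonneg hour (by norm_num)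
  have h3 : hour % 24 < 24 := Int.emod_lt_of_pos hour (by norm_num)
  simp_all [PySem.Int.mod_eq_emod_of_pos (show (0:Int) < 24 by norm_num)]; omega

-- ===== PORT B =====
def time_decision_alt (hour : Int) (minute : Int) (info : String) : Int × String :=
  let n : Int := if 24 ≤ hour then PySem.Int.floordiv hour 24 else 0
  let hour := if 24 ≤ hour then PySem.Int.mod hour 24 else hour
  let mm := PySem.Str.zfill (PySem.Int.toStr minute) 2
  if hour < 12 then
    (n, PySem.Int.toStr hour ++ ":" ++ mm ++ " " ++ info)
  else
    let h := if 12 < hour then PySem.Int.mod hour 12 else hour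
    if info == "AM" then
      (n, PySem.Int.toStr h ++ ":" ++ mm ++ " PM")
    else
      (n + 1, PySem.Int.toStr h ++ ":" ++ mm ++ " AM")

-- ===== PRECONDITION & SPEC =====
def Spec_time_decision (hour : Int) (minute : Int) (info : String) (out : Int × String) : Prop := out = time_decision_alt hour minute info
instance (hour : Int) (minute : Int) (info : String) (out : Int × String) : Decidable (Spec_time_decision hour minute info out) := by unfold Spec_time_decision; infer_instance

-- ===== CLAIM (what is proved, stated in full; the proofs are below) =====
def Claim_equal_time_decision : Prop := ∀ (hour : Int) (minute : Int) (info : String), Dom_time_decision hour minute info → Spec_time_decision hour minute info (time_decision hour minute info)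

-- ===== LEMMAS AND PROOFS =====
theorem td_eq_lt24 (hour minute : Int) (info : String) (h24 : hour < 24) :
    time_decision hour minute info = time_decision_alt hour minute info := by
  rw [time_decision]
  unfold time_decision_alt
  have hn : ¬ (24 ≤ hour) := by omega
  simp only [if_neg hn]
  split_ifs <;> first | rfl | (exfalso; omega)

-- ===== VERDICT (by name: the statement is the Claim_ definition above) =====
theorem time_decision_spec : Claim_equal_time_decision := by
  intro hour minute info _
  unfold Spec_time_decision
  by_cases h24 : hour < 24
  · exact td_eq_lt24 hour minute info h24
  · rw [time_decision]
    have h1 : ¬ hour < 12 := by omega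
    have h2 : ¬ (12 ≤ hour ∧ hour < 24) := by omega
    simp only [if_neg h1, if_neg h2]
    have hm : PySem.Int.mod hour 24 = hour % 24 := PySem.Int.mod_eq_emod_of_pos (by norm_num)
    have hb1 : 0 ≤ hour % 24 := Int.emod_nonneg hour (by norm_num)
    have hb2 : hour % 24 < 24 := Int.emod_lt_of_pos hour (by norm_num)
    rw [td_eq_lt24 _ _ _ (by omega)]
    conv_rhs => unfold time_decision_alt
    unfold time_decision_alt
    have hlt : ¬ (24 ≤ PySem.Int.mod hour 24) := by omega
    have hge : (24 ≤ hour) := by omega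
    simp only [if_neg hlt, if_pos hge]
    split_ifs <;> simp [Int.add_comm]
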